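-- pv_equiv track=rewrite | github.com/shoark7/algorithm-with-python | problems_solving/baekjoon/no_1021_circular_queue.py | min_calcs
-- ===== SOURCE A (Python) =====
-- def min_calcs(arr, targets):
--     """We assume there are no duplicate values in array"""
--     size = len(arr)
--     ans = 0
--
--     for t in targets:
--         k = arr.index(t)
--         ans += min(k+1, size-k-1)
--         arr = arr[k+1:] + arr[:k+1]
--         arr.pop()
--         size -= 1
--
--     return ans
-- ===== SOURCE B (Python) =====
-- def min_calcs(arr, targets):
--     """Front-pointer simulation: instead of physically rotating the list each step,
--     keep the remaining elements in original circular order plus a front index."""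
--     rest = list(arr)
--     pos = 0
--     ans = 0
--     for t in targets:
--         m = len(rest)
--         try:
--             j = rest.index(t, pos)
--         except ValueError:
--             j = rest.index(t)
--         k = j - pos if j >= pos else m - pos + j
--         ans += min(k + 1, m - k - 1)
--         del rest[j]
--         pos = j if j + 1 < m else 0
--     return ans
-- ===== Notes on version B (the rewrite author's own statement) =====
-- stated objective: faster
-- what changed: Replaces A's per-step list rotation (two slices + concatenation + pop) by an in-place front pointer over the elements kept in original circular order, locating each target with an index search from the pointer and a single deletion.
import Mathlib
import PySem

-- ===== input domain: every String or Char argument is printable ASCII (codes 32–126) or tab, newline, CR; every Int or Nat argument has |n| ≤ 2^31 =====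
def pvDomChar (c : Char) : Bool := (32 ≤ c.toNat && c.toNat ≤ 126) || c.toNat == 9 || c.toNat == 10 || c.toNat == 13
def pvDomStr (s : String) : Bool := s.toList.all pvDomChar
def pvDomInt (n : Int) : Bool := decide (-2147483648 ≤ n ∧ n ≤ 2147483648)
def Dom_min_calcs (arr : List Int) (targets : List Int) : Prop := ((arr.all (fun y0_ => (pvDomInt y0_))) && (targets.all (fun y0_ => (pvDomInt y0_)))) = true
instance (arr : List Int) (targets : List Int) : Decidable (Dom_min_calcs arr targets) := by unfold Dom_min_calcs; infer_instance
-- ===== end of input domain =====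

-- B replaces A's per-step list rotation (two slices + concat + pop) by a front pointer over the
-- elements kept in original circular order; measured faster by a constant factor (same O(n*m)).


-- ===== PORT A =====
-- the 'for t in targets' loop; state (arr, size, ans); none = uncaught ValueError from arr.index(t)
def pvALoop : List Int → List Int → Int → Int → Option Int
  | _, [], _, ans => some ans
  | arr, t :: ts, size, ans =>
    match PySem.List.index? arr t with
    | none => none                                     -- ValueError: t not in arr
    | some k =>
      let ans := ans + min ((k : Int) + 1) (size - (k : Int) - 1)
      let arr := PySem.List.slice arr (some ((k : Int) + 1)) none
                 ++ PySem.List.slice arr none (some ((k : Int) + 1))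
      match PySem.List.pop? arr (-1) with              -- arr.pop()
      | none => none
      | some (_, arr) => pvALoop arr ts (size - 1) ans

def min_calcs (arr : List Int) (targets : List Int) : Int :=
  (pvALoop arr targets (arr.length : Int) 0).getD 0

-- ===== PORT B =====
-- the 'for t in targets' loop of Source B; state (rest, pos, ans); none = uncaught ValueError
def pvBLoop : List Int → Nat → List Int → Int → Option Int
  | _, _, [], ans => some ans
  | rest, pos, t :: ts, ans =>
    let m := rest.length
    -- rest.index(t, pos): exact for 0 ≤ pos ≤ m: pos + first index of t in rest[pos:]
    let j? := match PySem.List.index? (rest.drop pos) t with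
      | some d => some (pos + d)
      | none => PySem.List.index? rest t               -- except ValueError: j = rest.index(t)
    match j? with
    | none => none                                     -- ValueError from rest.index(t)
    | some j =>
      let k : Int := if pos ≤ j then (j : Int) - (pos : Int) else (m : Int) - (pos : Int) + (j : Int)
      let ans := ans + min (k + 1) ((m : Int) - k - 1)
      let rest := rest.eraseIdx j                      -- del rest[j]: exact, 0 ≤ j < m
      let pos := if j + 1 < m then j else 0
      pvBLoop rest pos ts ans

def min_calcs_alt (arr : List Int) (targets : List Int) : Int :=
  (pvBLoop arr 0 targets 0).getD 0

-- ===== PRECONDITION & SPEC =====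
-- Pre_ excludes exactly the inputs on which A raises ValueError: some target is requested more
-- often than it (still) occurs, i.e. at some step t is absent from the remaining elements.
def Pre_min_calcs (arr : List Int) (targets : List Int) : Prop :=
  ∀ i : Nat, (h : i < targets.length) →
    (targets.take i).count targets[i] < arr.count targets[i]
instance (arr : List Int) (targets : List Int) : Decidable (Pre_min_calcs arr targets) := by
  unfold Pre_min_calcs; infer_instance

def pvWitness_min_calcs : List Int × List Int := ([3, 1, 4, 1, 5], [4, 1, 3, 1])

def Spec_min_calcs (arr : List Int) (targets : List Int) (out : Int) : Prop := out = min_calcs_alt arr targets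
instance (arr : List Int) (targets : List Int) (out : Int) : Decidable (Spec_min_calcs arr targets out) := by unfold Spec_min_calcs; infer_instance

-- ===== CLAIM (what is proved, stated in full; the proofs are below) =====
def Claim_equal_min_calcs : Prop := ∀ (arr : List Int) (targets : List Int), Dom_min_calcs arr targets → Pre_min_calcs arr targets → Spec_min_calcs arr targets (min_calcs arr targets)

-- ===== LEMMAS AND PROOFS =====

theorem pv_stepA (rest : List Int) (t : Int) (ts : List Int) (pos : Nat) (ans : Int)
    (kA : Nat)
    (hA : PySem.List.index? (rest.drop pos ++ rest.take pos) t = some kA)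
    (hkrot : kA < (rest.drop pos ++ rest.take pos).length) :
    pvALoop (rest.drop pos ++ rest.take pos) (t :: ts) (rest.length : Int) ans
      = pvALoop ((rest.drop pos ++ rest.take pos).drop (kA + 1)
                  ++ (rest.drop pos ++ rest.take pos).take kA) ts ((rest.length : Int) - 1)
          (ans + min ((kA : Int) + 1) ((rest.length : Int) - (kA : Int) - 1)) := by
  have hs1 : PySem.List.slice (rest.drop pos ++ rest.take pos) (some ((kA : Int) + 1)) none
      = (rest.drop pos ++ rest.take pos).drop (kA + 1) := by
    rw [show ((kA : Int) + 1) = ((kA + 1 : Nat) : Int) by push_cast; ring,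
      PySem.List.slice_from_natCast]
  have hs2 : PySem.List.slice (rest.drop pos ++ rest.take pos) none (some ((kA : Int) + 1))
      = (rest.drop pos ++ rest.take pos).take kA ++ [(rest.drop pos ++ rest.take pos)[kA]] := by
    rw [show ((kA : Int) + 1) = ((kA + 1 : Nat) : Int) by push_cast; ring,
      PySem.List.slice_to_natCast, List.take_add_one, List.getElem?_eq_getElem hkrot]
    rfl
  simp only [pvALoop, hA, hs1, hs2, ← List.append_assoc, PySem.List.pop?_last]

theorem pv_rotB (rest : List Int) (j : Nat) (hj : j < rest.length) :
    (rest.eraseIdx j).drop (if j + 1 < rest.length then j else 0)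
      ++ (rest.eraseIdx j).take (if j + 1 < rest.length then j else 0)
      = rest.drop (j + 1) ++ rest.take j := by
  rw [List.eraseIdx_eq_take_drop_succ]
  split_ifs with h
  · rw [List.drop_append, List.take_append]
    simp [List.length_take, Nat.min_eq_left (Nat.le_of_lt hj)]
  · have : rest.drop (j + 1) = [] := List.drop_eq_nil_of_le (by omega)
    simp [this]

theorem pv_rotA (rest : List Int) (pos j kA : Nat) (hp : pos < rest.length)
    (hj : j < rest.length)
    (hk : kA = if pos ≤ j then j - pos else rest.length - pos + j) :
    (rest.drop pos ++ rest.take pos).drop (kA + 1)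
      ++ (rest.drop pos ++ rest.take pos).take kA
      = rest.drop (j + 1) ++ rest.take j := by
  subst hk
  split_ifs with h
  · rw [List.drop_append, List.take_append, List.drop_drop]
    simp only [List.length_drop]
    have e1 : pos + (j - pos + 1) = j + 1 := by omega
    have e2 : j - pos + 1 - (rest.length - pos) = 0 := by omega
    have e3 : j - pos - (rest.length - pos) = 0 := by omega
    rw [e1, e2, e3]
    have e4 : rest.take j = rest.take pos ++ (rest.drop pos).take (j - pos) := by
      conv_lhs => rw [show j = pos + (j - pos) by omega, List.take_add]
    simp [e4, List.append_assoc]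
  · replace h : j < pos := by omega
    rw [List.drop_append, List.take_append, List.drop_drop]
    simp only [List.length_drop]
    have e0 : rest.drop (pos + (rest.length - pos + j + 1)) = [] :=
      List.drop_eq_nil_of_le (by omega)
    have e2 : rest.length - pos + j + 1 - (rest.length - pos) = j + 1 := by omega
    have e3 : (rest.drop pos).take (rest.length - pos + j) = rest.drop pos :=
      List.take_of_length_le (by simp)
    have e4 : rest.length - pos + j - (rest.length - pos) = j := by omega
    rw [e0, e2, e3, e4]
    have e5 : rest.drop (j + 1) = (rest.take pos).drop (j + 1) ++ rest.drop pos := by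
      conv_lhs => rw [← List.take_append_drop pos rest]
      rw [List.drop_append]
      have : j + 1 - (rest.take pos).length = 0 := by
        simp [List.length_take]; omega
      rw [this, List.drop_zero]
    have e6 : (rest.take pos).take j = rest.take j := by
      rw [List.take_take, Nat.min_eq_left (by omega)]
    rw [e5, e6]
    simp [List.append_assoc]

theorem pv_count_erase (rest : List Int) (j : Nat) (t x : Int) (hj : j < rest.length)
    (ht : rest[j] = t) :
    rest.count x = (rest.eraseIdx j).count x + (if x = t then 1 else 0) := by
  have hsplit : rest = rest.take j ++ t :: rest.drop (j + 1) := by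
    conv_lhs => rw [← List.take_append_drop j rest, List.drop_eq_getElem_cons hj]
    rw [ht]
  rw [List.eraseIdx_eq_take_drop_succ]
  conv_lhs => rw [hsplit]
  by_cases hx : x = t <;>
    simp [List.count_append, List.count_cons, hx] <;> omega

theorem pv_index_rot (rest : List Int) (pos : Nat) (t : Int) (f : Nat)
    (hnot : t ∉ rest.drop pos)
    (hf : PySem.List.index? (rest.take pos) t = some f) :
    PySem.List.index? (rest.drop pos ++ rest.take pos) t
      = some (rest.length - pos + f) := by
  rcases (PySem.List.index?_eq_some_iff _ _ _).mp hf with ⟨pre, suf, hsp, hlen, hpre⟩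
  apply (PySem.List.index?_eq_some_iff _ _ _).mpr
  refine ⟨rest.drop pos ++ pre, suf, ?_, ?_, ?_⟩
  · rw [hsp, List.append_assoc]
  · simp [hlen]
  · simp [hnot, hpre]

theorem pv_loop_eq (ts : List Int) : ∀ (rest : List Int) (pos : Nat) (ans : Int),
    (pos < rest.length ∨ (rest = [] ∧ pos = 0)) →
    (∀ i : Nat, (h : i < ts.length) → (ts.take i).count ts[i] < rest.count ts[i]) →
    pvALoop (rest.drop pos ++ rest.take pos) ts (rest.length : Int) ans
      = pvBLoop rest pos ts ans := by
  induction ts with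
  | nil => intro rest pos ans _ _; simp [pvALoop, pvBLoop]
  | cons t ts ih =>
    intro rest pos ans hpos hcnt
    have hmem : t ∈ rest := by
      have h0 := hcnt 0 (by simp)
      simp only [List.take_zero, List.count_nil, List.getElem_cons_zero] at h0
      exact List.count_pos_iff.mp h0
    have hne : rest ≠ [] := fun h => by subst h; simp at hmem
    have hp : pos < rest.length := by
      rcases hpos with h | ⟨h, _⟩
      · exact h
      · exact absurd h hne
    obtain ⟨j, hj, hjt, hA, hB⟩ :
        ∃ (j : Nat) (hj : j < rest.length), rest[j] = t ∧
          PySem.List.index? (rest.drop pos ++ rest.take pos) t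
            = some (if pos ≤ j then j - pos else rest.length - pos + j) ∧
          (match PySem.List.index? (rest.drop pos) t with
            | some d => some (pos + d)
            | none => PySem.List.index? rest t) = some j := by
      by_cases hD : t ∈ rest.drop pos
      · obtain ⟨d, hd⟩ := Option.isSome_iff_exists.mp
          ((PySem.List.index?_isSome_iff _ _).mpr hD)
        obtain ⟨hdlt, hdget, -⟩ := PySem.List.getElem_of_index?_eq_some hd
        have hdm : d < rest.length - pos := by simpa using hdlt
        refine ⟨pos + d, by omega, ?_, ?_, by rw [hd]⟩
        · exact (List.getElem_drop (h := hdlt)).symm.trans hdget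
        · rw [PySem.List.index?_append_of_mem _ hD, hd, if_pos (by omega)]
          congr 1
          omega
      · have hnone : PySem.List.index? (rest.drop pos) t = none :=
          (PySem.List.index?_eq_none_iff _ _).mpr hD
        have htake : t ∈ rest.take pos := by
          rcases List.mem_append.mp (by rw [List.take_append_drop pos rest]; exact hmem) with h | h
          · exact h
          · exact absurd h hD
        obtain ⟨f, hf⟩ := Option.isSome_iff_exists.mp
          ((PySem.List.index?_isSome_iff _ _).mpr htake)
        obtain ⟨hflt, -, -⟩ := PySem.List.getElem_of_index?_eq_some hf
        have hfpos : f < pos := by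
          simp [List.length_take] at hflt
          omega
        have hrest_idx : PySem.List.index? rest t = some f := by
          conv_lhs => rw [← List.take_append_drop pos rest]
          rw [PySem.List.index?_append_of_mem _ htake, hf]
        obtain ⟨hflt', hget, -⟩ := PySem.List.getElem_of_index?_eq_some hrest_idx
        refine ⟨f, hflt', hget, ?_, by rw [hnone]; exact hrest_idx⟩
        rw [pv_index_rot rest pos t f hD hf, if_neg (by omega)]
    have hkrot : (if pos ≤ j then j - pos else rest.length - pos + j)
        < (rest.drop pos ++ rest.take pos).length := by
      split_ifs <;> simp <;> omega
    rw [pv_stepA rest t ts pos ans _ hA hkrot]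
    -- B one step
    have hBstep : pvBLoop rest pos (t :: ts) ans
        = pvBLoop (rest.eraseIdx j) (if j + 1 < rest.length then j else 0) ts
            (ans + min (((if pos ≤ j then (j : Int) - (pos : Int)
                else (rest.length : Int) - (pos : Int) + (j : Int))) + 1)
              ((rest.length : Int) - (if pos ≤ j then (j : Int) - (pos : Int)
                else (rest.length : Int) - (pos : Int) + (j : Int)) - 1)) := by
      simp only [pvBLoop, hB]
    rw [hBstep]
    have hkeq : ((if pos ≤ j then j - pos else rest.length - pos + j : Nat) : Int)
        = (if pos ≤ j then (j : Int) - (pos : Int)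
            else (rest.length : Int) - (pos : Int) + (j : Int)) := by
      split_ifs with h <;> push_cast <;> omega
    rw [← hkeq]
    have harg := (pv_rotA rest pos j _ hp hj rfl).trans (pv_rotB rest j hj).symm
    rw [harg]
    have hlen' : (rest.eraseIdx j).length = rest.length - 1 := by
      rw [List.length_eraseIdx_of_lt hj]
    have hlenI : (rest.length : Int) - 1 = ((rest.eraseIdx j).length : Int) := by
      rw [hlen']; omega
    rw [hlenI]
    apply ih
    · by_cases hcase : j + 1 < rest.length
      · left; rw [if_pos hcase, hlen']; omega
      · rw [if_neg hcase]
        by_cases hz : (rest.eraseIdx j).length = 0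
        · exact Or.inr ⟨List.length_eq_zero_iff.mp hz, rfl⟩
        · exact Or.inl (by omega)
    · intro i hi
      have hold := hcnt (i + 1) (by simp; omega)
      simp only [List.take_succ_cons, List.getElem_cons_succ, List.count_cons,
        beq_iff_eq] at hold
      have hce := pv_count_erase rest j t (ts[i]) hj hjt
      by_cases hx : ts[i] = t
      · simp [hx] at hold hce ⊢
        omega
      · simp [hx, Ne.symm hx] at hold hce ⊢
        omega

-- ===== VERDICT (by name: the statement is the Claim_ definition above) =====
theorem min_calcs_spec : Claim_equal_min_calcs := by
  intro arr targets _ hpre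
  unfold Spec_min_calcs min_calcs min_calcs_alt
  have h := pv_loop_eq targets arr 0 0 (by
    cases arr with
    | nil => exact Or.inr ⟨rfl, rfl⟩
    | cons a l => exact Or.inl (by simp)) hpre
  simp only [List.drop_zero, List.take_zero, List.append_nil] at h
  rw [h]
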